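-- pv_equiv track=rewrite | github.com/Pleistone/404CTF_2023 | Programmation/Des_mots_des_mots_des_mots/rules.py | ascii_transforme
-- ===== SOURCE A (Python) =====
-- def ascii_transforme(mot):
--     mot_list = list(mot)
--     consonnes = "bcdfghjklmnpqrstvwxzBCDFGHJKLMNPQRSTVWXZ"
--     voyelles = "aeiouyAEIOUY"
--
--     dictionnaire = {'b': ord('a'), 'B': ord('A'), 'c': ord('a'), 'C': ord('A'), 'd': ord('a'), 'D': ord('A'), 'f': ord('e'), 'F': ord('E'), 'g': ord('e'), 'G': ord('E'),
--                     'h': ord('e'), 'H': ord('E'), 'j': ord('i'), 'J': ord('I'), 'k': ord('i'), 'K': ord('I'), 'l': ord('i'), 'L': ord('I'), 'm': ord('i'), 'M': ord('I'),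
--                     'n': ord('i'), 'N': ord('I'), 'p': ord('o'), 'P': ord('O'), 'q': ord('o'), 'Q': ord('O'), 'r': ord('o'), 'R': ord('O'), 's': ord('o'), 'S': ord('O'),
--                     't': ord('o'), 'T': ord('O'), 'v': ord('u'), 'V': ord('U'), 'w': ord('u'), 'W': ord('U'), 'x': ord('u'), 'X': ord('U'), 'z': ord('y'), 'Z': ord('Y')}
--
--     for indice, lettre in enumerate(mot_list):
--         if lettre in consonnes:
--             vp = dictionnaire[lettre]
--             som = 0
--             for i in range(indice):
--                 som += ord(mot_list[i])*(2**(indice-i))*(mot_list[i] in voyelles)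
--             ascii = ((vp+som)%95)+32
--             mot_list.insert(indice+1,chr(ascii))
--
--     mot = "".join(mot_list)
--     return mot
-- ===== SOURCE B (Python) =====
-- # B: one pass with a running weighted vowel sum kept mod 95 (only its residue matters),
-- # consonant->vowel replacement computed arithmetically (largest vowel code <= the letter,
-- # case restored) instead of the 40-entry dictionary; each consonant's insertion chain is
-- # emitted by a small recursion instead of re-scanning the growing list.
--
-- _VOWEL_CODES = (97, 101, 105, 111, 117, 121)  # a e i o u y
--
--
-- def _classify(o):
--     """(is_vowel, is_consonant, replacement code) for a character code o."""
--     base = o + 32 if 65 <= o <= 90 else o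
--     if base in _VOWEL_CODES:
--         return 1, 0, 0
--     if 97 <= base <= 122:
--         vp = 0
--         for v in _VOWEL_CODES:
--             if v <= base:
--                 vp = v
--         return 0, 1, vp + (o - base)
--     return 0, 0, 0
--
--
-- def _emit(o, t, res):
--     """Append o; if it is a consonant, recurse on the inserted code. Returns the new t."""
--     res.append(o)
--     v, c, vp = _classify(o)
--     nxt = (vp + t) % 95 + 32 if c else None
--     t = (2 * t + 2 * o * v) % 95
--     if nxt is None:
--         return t
--     return _emit(nxt, t, res)
--
--
-- def ascii_transforme(mot):
--     res = []
--     t = 0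
--     for ch in mot:
--         t = _emit(ord(ch), t, res)
--     return "".join(map(chr, res))
-- ===== Notes on version B (the rewrite author's own statement) =====
-- stated objective: faster
-- what changed: Instead of re-scanning the growing character list at every consonant to rebuild the 2^(indice-i)-weighted vowel sum from exponentially growing big-int powers and looking the replacement up in a 40-entry dict, B makes one pass over integer character codes carrying that sum as a single running value kept reduced mod 95 (only its residue is used), computes each consonant's replacement arithmetically as the largest vowel code not above the lowercased letter (case restored), and emits each insertion chain by a small recursion.
import Mathlib
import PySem

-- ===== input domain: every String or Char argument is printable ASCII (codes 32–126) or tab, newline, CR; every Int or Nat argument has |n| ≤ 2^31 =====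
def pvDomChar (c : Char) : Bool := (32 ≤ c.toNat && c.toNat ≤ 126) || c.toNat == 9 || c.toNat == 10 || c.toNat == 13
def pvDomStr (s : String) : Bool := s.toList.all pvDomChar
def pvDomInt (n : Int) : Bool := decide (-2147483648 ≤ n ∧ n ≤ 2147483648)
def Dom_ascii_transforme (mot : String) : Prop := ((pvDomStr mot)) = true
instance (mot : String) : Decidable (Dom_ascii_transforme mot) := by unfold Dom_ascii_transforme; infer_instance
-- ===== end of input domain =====

-- B replaces A's per-consonant rescans of the growing list (2^k-weighted vowel prefix sums over big
-- integers) by one pass over integer character codes carrying that sum reduced mod 95, with the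
-- consonant → vowel table replaced by an arithmetic rule (largest vowel code ≤ the letter, case kept).

-- ===== PORT A =====
-- A's module constants: the consonant / vowel strings (membership-tested only, so held as their
-- character lists) and the consonant → vowel-code dict (an association list, first match wins)
def pvConsonnes : List Char := ['b','c','d','f','g','h','j','k','l','m','n','p','q','r','s','t','v','w','x','z','B','C','D','F','G','H','J','K','L','M','N','P','Q','R','S','T','V','W','X','Z']
def pvVoyelles : List Char := ['a','e','i','o','u','y','A','E','I','O','U','Y']
def pvDicoL : List (Char × Int) := [('b',97),('B',65),('c',97),('C',65),('d',97),('D',65),('f',101),('F',69),('g',101),('G',69),('h',101),('H',69),('j',105),('J',73),('k',105),('K',73),('l',105),('L',73),('m',105),('M',73),('n',105),('N',73),('p',111),('P',79),('q',111),('Q',79),('r',111),('R',79),('s',111),('S',79),('t',111),('T',79),('v',117),('V',85),('w',117),('W',85),('x',117),('X',85),('z',121),('Z',89)]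
-- ord(c), and the int value of `c in voyelles`
def pvOrd (c : Char) : Int := (c.toNat : Int)
def pvVFlag (c : Char) : Int := if pvVoyelles.contains c then 1 else 0

-- A's inner loop: som = sum over range(indice) of ord(mot_list[i]) * 2**(indice-i) * (mot_list[i] in voyelles);
-- the index i is always in range, so the pyGetD default ' ' is never used
def pvSomA (done : List Char) : Int :=
  (PySem.List.pyRange 0 (done.length : Int) 1).foldl
    (fun som i => som + pvOrd (PySem.List.pyGetD done i ' ')
        * 2 ^ (((done.length : Int) - i).toNat)
        * pvVFlag (PySem.List.pyGetD done i ' ')) 0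

-- A's for-loop over the growing mot_list: `done` is the prefix already visited (indices < indice, so
-- indice = done.length), `rest` the tail still to visit; `mot_list.insert(indice+1, ch)` is consing ch
-- onto `rest`.  `fuel` is only a termination guard; ascii_transforme passes enough (proved below).
def pvGoA : Nat → List Char → List Char → List Char
  | 0, done, rest => done ++ rest
  | _ + 1, done, [] => done
  | fuel + 1, done, lettre :: rs =>
    if pvConsonnes.contains lettre then
      let vp := (pvDicoL.lookup lettre).getD 0
      let som := pvSomA done
      let ascii := PySem.Int.mod (vp + som) 95 + 32
      pvGoA fuel (done ++ [lettre]) (Char.ofNat ascii.toNat :: rs)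
    else
      pvGoA fuel (done ++ [lettre]) rs

def ascii_transforme (mot : String) : String :=
  String.ofList (pvGoA (10 * mot.toList.length + 1) [] mot.toList)

-- ===== PORT B =====
-- B works on integer character codes.  _classify(o) = (is_vowel, is_consonant, replacement code):
-- the replacement is the LARGEST vowel code ≤ the lowercased code, case restored by o - base
def pvVowelCodes : List Int := [97, 101, 105, 111, 117, 121]

def pvClassify (o : Int) : Int × Int × Int :=
  let base := if 65 ≤ o ∧ o ≤ 90 then o + 32 else o
  if pvVowelCodes.contains base then (1, 0, 0)
  else if 97 ≤ base ∧ base ≤ 122 then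
    (0, 1, pvVowelCodes.foldl (fun vp v => if v ≤ base then v else vp) 0 + (o - base))
  else (0, 0, 0)

-- B's _emit: append the code; on a consonant recurse on the inserted code, threading the running
-- sum t (kept mod 95).  `fuel` is only a termination guard; 10 is enough (proved below).
def pvEmit : Nat → Int → Int → List Int → List Int × Int
  | 0, _, t, res => (res, t)
  | fuel + 1, o, t, res =>
    let res' := res ++ [o]
    let cl := pvClassify o
    let nxt : Option Int := if cl.2.1 = 1 then some (PySem.Int.mod (cl.2.2 + t) 95 + 32) else none
    let t' := PySem.Int.mod (2 * t + 2 * o * cl.1) 95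
    match nxt with
    | none => (res', t')
    | some n => pvEmit fuel n t' res'

def ascii_transforme_alt (mot : String) : String :=
  String.ofList
    (((mot.toList.foldl (fun st ch => pvEmit 10 (ch.toNat : Int) st.2 st.1)
        (([] : List Int), (0 : Int))).1).map (fun o => Char.ofNat o.toNat))

-- ===== PRECONDITION & SPEC =====
def Spec_ascii_transforme (mot : String) (out : String) : Prop := out = ascii_transforme_alt mot
instance (mot : String) (out : String) : Decidable (Spec_ascii_transforme mot out) := by unfold Spec_ascii_transforme; infer_instance

-- ===== CLAIM (what is proved, stated in full; the proofs are below) =====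
def Claim_equal_ascii_transforme : Prop := ∀ (mot : String), Dom_ascii_transforme mot → Spec_ascii_transforme mot (ascii_transforme mot)

-- ===== LEMMAS AND PROOFS =====

-- the exact (un-reduced) running weighted vowel sum after a list of emitted chars
def pvW (l : List Char) : Int := l.foldl (fun t c => 2 * t + 2 * pvOrd c * pvVFlag c) 0

-- Nat-arithmetic mirrors of the consonant test, vowel flag and replacement table (bitmask / radix
-- literals), so that chain termination can be decided by kernel-fast Nat arithmetic
def pvMaskC : Nat := 7806574911591665383613442540234080256
def pvMaskV : Nat := 2827248898707216612765611157299920896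
def pvDTab : Nat := 14535417126878134480416676995776535601014700008937684597899076982225148499118837621072929613225165462432279114010645565287112077543595939778313545014672167572719806351546533809010532832391812872911595061288197661301908391911661367922419257831577898713004113920
def pvIsConsN (n : Nat) : Bool := pvMaskC / 2 ^ n % 2 == 1
def pvVFlagN (n : Nat) : Nat := pvMaskV / 2 ^ n % 2
def pvDicoT (n : Nat) : Nat := pvDTab / 128 ^ n % 128

-- does the insertion chain starting at char code n with running sum t die out within `fuel` visits?
def pvNatCompletes : Nat → Nat → Nat → Bool
  | 0, _, _ => false
  | fuel + 1, t, n =>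
    if pvIsConsN n then
      pvNatCompletes fuel ((2 * t + 2 * n * pvVFlagN n) % 95) ((pvDicoT n + t) % 95 + 32)
    else true

-- all 95 × 95 states (t, code 32+r): state k ↦ (k / 95, 32 + k % 95)
def pvCheck : Nat → Bool
  | 0 => true
  | k + 1 => pvNatCompletes 10 (k / 95) (32 + k % 95) && pvCheck k

-- B's whole pass written recursively (the foldl of ascii_transforme_alt is bridged to this below)
def pvRunB : List Char → Int → List Char
  | [], _ => []
  | c :: rs, t =>
    ((pvEmit 10 (c.toNat : Int) t []).1.map (fun o => Char.ofNat o.toNat))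
      ++ pvRunB rs (pvEmit 10 (c.toNat : Int) t []).2

set_option maxRecDepth 40000 in
lemma pvGN : pvCheck 9025 = true := by decide

-- on every code ≤ 126, B's arithmetic classification agrees with A's membership tests and dict,
-- and with the Nat mirrors above; consonant codes are ≥ 65
lemma pvBR : (List.range 127).all (fun n =>
    (pvConsonnes.contains (Char.ofNat n) == pvIsConsN n)
    && (decide (pvVFlag (Char.ofNat n) = (pvClassify (n : Int)).1))
    && (decide ((pvClassify (n : Int)).1 = (pvVFlagN n : Int)))
    && (!(pvIsConsN n) || (decide ((pvClassify (n : Int)).2.1 = 1)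
          && decide (((pvDicoL.lookup (Char.ofNat n)).getD 0) = (pvClassify (n : Int)).2.2)
          && decide ((pvClassify (n : Int)).2.2 = (pvDicoT n : Int)) && decide (65 ≤ n)))
    && (pvIsConsN n || decide ((pvClassify (n : Int)).2.1 ≠ 1))) = true := by
  decide

lemma pvToNat_ofNat (m : Nat) (h : m ≤ 126) : (Char.ofNat m).toNat = m := by
  have hv : m.isValidChar := Or.inl (by omega)
  rw [Char.ofNat, dif_pos hv]; rfl

lemma pvBR' (c : Char) (h : c.toNat ≤ 126) :
    pvConsonnes.contains c = pvIsConsN c.toNat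
    ∧ pvVFlag c = (pvClassify (c.toNat : Int)).1
    ∧ (pvClassify (c.toNat : Int)).1 = (pvVFlagN c.toNat : Int)
    ∧ (pvIsConsN c.toNat = true →
        (pvClassify (c.toNat : Int)).2.1 = 1
        ∧ (pvDicoL.lookup c).getD 0 = (pvClassify (c.toNat : Int)).2.2
        ∧ (pvClassify (c.toNat : Int)).2.2 = (pvDicoT c.toNat : Int)
        ∧ 65 ≤ c.toNat)
    ∧ (pvIsConsN c.toNat = false → (pvClassify (c.toNat : Int)).2.1 ≠ 1) := by
  have h1 := List.all_eq_true.mp pvBR c.toNat (by simp [List.mem_range]; omega)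
  rw [Char.ofNat_toNat] at h1
  simp only [Bool.and_eq_true, beq_iff_eq, decide_eq_true_eq, Bool.or_eq_true, Bool.not_eq_true'] at h1
  refine ⟨h1.1.1.1.1, h1.1.1.1.2, h1.1.1.2, fun hc => ?_, fun hc => ?_⟩
  · rcases h1.1.2 with h2 | h2
    · rw [hc] at h2; cases h2
    · exact ⟨h2.1.1.1, h2.1.1.2, h2.1.2, h2.2⟩
  · rcases h1.2 with h2 | h2
    · rw [hc] at h2; cases h2
    · exact h2

lemma pvCheck_extract : ∀ m, pvCheck m = true → ∀ k, k < m → pvNatCompletes 10 (k / 95) (32 + k % 95) = true := by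
  intro m
  induction m with
  | zero => intro _ k hk; omega
  | succ m ih =>
    intro hck k hk
    rw [pvCheck, Bool.and_eq_true] at hck
    rcases Nat.lt_succ_iff_lt_or_eq.mp hk with h | h
    · exact ih hck.2 k h
    · subst h; exact hck.1

lemma pvG (t n : Nat) (ht : t < 95) (h32 : 32 ≤ n) (h126 : n ≤ 126) : pvNatCompletes 10 t n = true := by
  have h := pvCheck_extract 9025 pvGN (t * 95 + (n - 32)) (by omega)
  have e1 : (t * 95 + (n - 32)) / 95 = t := by omega
  have e2 : 32 + (t * 95 + (n - 32)) % 95 = n := by omega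
  rw [e1, e2] at h
  exact h

lemma pvW_append (l : List Char) (c : Char) :
    pvW (l ++ [c]) = 2 * pvW l + 2 * pvOrd c * pvVFlag c := by
  simp [pvW, List.foldl_append]

lemma pvMod95 (a : Int) : PySem.Int.mod a 95 = a % 95 :=
  PySem.Int.mod_eq_emod_of_pos (by norm_num)

lemma pvSomA_eq (l : List Char) : pvSomA l = pvW l := by
  induction l using List.reverseRecOn with
  | nil => simp [pvSomA, pvW, PySem.List.pyRange]
  | append_singleton xs c ih =>
    rw [pvW_append, ← ih]
    unfold pvSomA
    rw [PySem.List.foldl_add, PySem.List.foldl_add]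
    rw [PySem.List.pyRange_zero_natCast, PySem.List.pyRange_zero_natCast]
    rw [List.map_map, List.map_map]
    simp only [List.length_append, List.length_singleton]
    rw [List.range_succ, List.map_append, List.sum_append]
    have hlast : (List.map
        ((fun i => pvOrd (PySem.List.pyGetD (xs ++ [c]) i ' ') * 2 ^ ((((xs.length + 1 : Nat)) : Int) - i).toNat *
            pvVFlag (PySem.List.pyGetD (xs ++ [c]) i ' ')) ∘ fun (k : Nat) => (k : Int)) [xs.length]).sum
        = 2 * pvOrd c * pvVFlag c := by
      simp only [List.map_cons, List.map_nil, List.sum_cons, List.sum_nil, Function.comp]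
      rw [PySem.List.pyGetD_natCast]
      have hg : (xs ++ [c]).getD xs.length ' ' = c := by
        simp [List.getD_eq_getElem?_getD]
      have he : ((((xs.length + 1 : Nat)) : Int) - (xs.length : Int)).toNat = 1 := by omega
      rw [hg, he]
      ring
    rw [hlast]
    have hcongr : List.map
        ((fun i => pvOrd (PySem.List.pyGetD (xs ++ [c]) i ' ') * 2 ^ ((((xs.length + 1 : Nat)) : Int) - i).toNat *
            pvVFlag (PySem.List.pyGetD (xs ++ [c]) i ' ')) ∘ fun (k : Nat) => (k : Int)) (List.range xs.length)
        = List.map (fun (k : Nat) => 2 * (((fun i => pvOrd (PySem.List.pyGetD xs i ' ') * 2 ^ (((xs.length : Nat) : Int) - i).toNat *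
            pvVFlag (PySem.List.pyGetD xs i ' ')) ∘ fun (k : Nat) => (k : Int)) k)) (List.range xs.length) := by
      apply List.map_congr_left
      intro k hk
      rw [List.mem_range] at hk
      simp only [Function.comp]
      rw [PySem.List.pyGetD_natCast, PySem.List.pyGetD_natCast]
      have hg : (xs ++ [c]).getD k ' ' = xs.getD k ' ' := by
        simp [List.getD_eq_getElem?_getD, List.getElem?_append_left hk]
      have he : ((((xs.length + 1 : Nat)) : Int) - (k : Int)).toNat = (((xs.length : Nat) : Int) - (k : Int)).toNat + 1 := by omega
      rw [hg, he, pow_succ]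
      ring
    rw [hcongr, List.sum_map_mul_left]
    ring

lemma pvEmit_acc (fuel : Nat) (o t : Int) (res : List Int) :
    pvEmit fuel o t res = (res ++ (pvEmit fuel o t []).1, (pvEmit fuel o t []).2) := by
  induction fuel generalizing o t res with
  | zero => simp [pvEmit]
  | succ fuel ih =>
    rw [pvEmit, pvEmit]
    by_cases hc : (pvClassify o).2.1 = 1
    · simp only [if_pos hc, ih _ _ (res ++ [o]), ih _ _ ([] ++ [o])]
      simp
    · simp only [if_neg hc]
      simp

lemma pvCL : ∀ (k : Nat) (c : Char) (done rs : List Char) (m : Nat) (tN : Nat),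
    c.toNat ≤ 126 → (pvW done) % 95 = (tN : Int) →
    pvNatCompletes k tN c.toNat = true → k ≤ m →
    ∃ j, 1 ≤ j ∧ j ≤ k ∧
      pvGoA m done (c :: rs)
        = pvGoA (m - j) (done ++ (pvEmit k (c.toNat : Int) (tN : Int) []).1.map (fun o => Char.ofNat o.toNat)) rs ∧
      ∃ tN' : Nat, tN' < 95 ∧ (pvEmit k (c.toNat : Int) (tN : Int) []).2 = (tN' : Int) ∧
        (pvW (done ++ (pvEmit k (c.toNat : Int) (tN : Int) []).1.map (fun o => Char.ofNat o.toNat))) % 95 = (tN' : Int) := by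
  intro k
  induction k with
  | zero => intro c done rs m tN h126 hW hcom hm; simp [pvNatCompletes] at hcom
  | succ k ih =>
    intro c done rs m tN h126 hW hcom hm
    obtain ⟨m', rfl⟩ : ∃ m', m = m' + 1 := ⟨m - 1, by omega⟩
    obtain ⟨hbc, hbv, hbvn, hbd, hbnc⟩ := pvBR' c h126
    have hofc : Char.ofNat ((c.toNat : Int)).toNat = c := by
      rw [Int.toNat_natCast, Char.ofNat_toNat]
    by_cases hc : c ∈ pvConsonnes
    · have hcons : pvIsConsN c.toNat = true := by
        rw [← hbc]; simp [List.contains_eq_mem, hc]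
      rw [pvNatCompletes, if_pos hcons] at hcom
      obtain ⟨hcl1, hvp, hvpn, h65⟩ := hbd hcons
      set nd : Nat := (pvDicoT c.toNat + tN) % 95 + 32 with hnd
      set tN2 : Nat := (2 * tN + 2 * c.toNat * pvVFlagN c.toNat) % 95 with htN2
      have hnd126 : nd ≤ 126 := by omega
      have hdBtoNat : (Char.ofNat nd).toNat = nd := pvToNat_ofNat nd hnd126
      have hA : ((PySem.Int.mod ((pvDicoL.lookup c).getD 0 + pvSomA done) 95 + 32)).toNat = nd := by
        rw [pvMod95, pvSomA_eq, hvp, hvpn]; omega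
      have hB : PySem.Int.mod ((pvClassify (c.toNat : Int)).2.2 + (tN : Int)) 95 + 32 = (nd : Int) := by
        rw [pvMod95, hvpn]; omega
      obtain ⟨p, hp⟩ : ∃ p, c.toNat * pvVFlagN c.toNat = p := ⟨_, rfl⟩
      have hip : (c.toNat : Int) * (pvVFlagN c.toNat : Int) = (p : Int) := by
        rw [← hp]; push_cast; ring
      have htN2p : tN2 = (2 * tN + 2 * p) % 95 := by
        rw [htN2, mul_assoc 2 c.toNat, hp]
      have ht' : PySem.Int.mod (2 * (tN : Int) + 2 * (c.toNat : Int) * (pvClassify (c.toNat : Int)).1) 95 = (tN2 : Int) := by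
        rw [pvMod95, hbvn, mul_assoc 2, hip, htN2p]; push_cast; omega
      have hWc : pvW (done ++ [c]) % 95 = (tN2 : Int) := by
        rw [pvW_append, hbv, hbvn]
        unfold pvOrd
        rw [mul_assoc 2, hip, htN2p]; push_cast; omega
      have hchain : pvEmit (k + 1) (c.toNat : Int) (tN : Int) []
          = ([(c.toNat : Int)] ++ (pvEmit k ((Char.ofNat nd).toNat : Int) (tN2 : Int) []).1,
             (pvEmit k ((Char.ofNat nd).toNat : Int) (tN2 : Int) []).2) := by
        rw [pvEmit]
        simp only [if_pos hcl1]
        rw [hB, ht', hdBtoNat, pvEmit_acc k ((nd : Nat) : Int) ((tN2 : Nat) : Int) ([] ++ [(c.toNat : Int)])]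
        simp
      have hgoA : pvGoA (m' + 1) done (c :: rs) = pvGoA m' (done ++ [c]) (Char.ofNat nd :: rs) := by
        rw [pvGoA]
        simp only [List.contains_eq_mem, hc, decide_true, if_true]
        rw [hA]
      obtain ⟨j', hj1, hjk, hgo, tN'', h95, hc2, hWfin⟩ :=
        ih (Char.ofNat nd) (done ++ [c]) rs m' tN2 (by rw [hdBtoNat]; omega) hWc
          (by rw [hdBtoNat]; exact hcom) (by omega)
      refine ⟨j' + 1, by omega, by omega, ?_, tN'', h95, ?_, ?_⟩
      · rw [hgoA, hgo, hchain]
        have hmj : m' - j' = m' + 1 - (j' + 1) := by omega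
        rw [hmj]
        simp only [List.map_append, List.map_cons, List.map_nil, hofc, List.append_assoc]
      · rw [hchain]
        exact hc2
      · rw [hchain]
        simp only [List.map_append, List.map_cons, List.map_nil, hofc]
        rw [← List.append_assoc]
        exact hWfin
    · have hcons : pvIsConsN c.toNat = false := by
        rw [← hbc]; simp [List.contains_eq_mem, hc]
      have hncl : (pvClassify (c.toNat : Int)).2.1 ≠ 1 := hbnc hcons
      have hemit : pvEmit (k + 1) (c.toNat : Int) (tN : Int) []
          = ([(c.toNat : Int)], PySem.Int.mod (2 * (tN : Int) + 2 * (c.toNat : Int) * (pvClassify (c.toNat : Int)).1) 95) := by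
        rw [pvEmit]
        simp only [if_neg hncl]
        simp
      refine ⟨1, le_refl _, by omega, ?_, ?_⟩
      · rw [pvGoA, hemit]
        simp only [List.contains_eq_mem, hc, decide_false]
        simp
      · rw [hemit]
        refine ⟨((2 * tN + 2 * c.toNat * pvVFlagN c.toNat) % 95 : Nat), by omega, ?_, ?_⟩
        · show PySem.Int.mod (2 * (tN : Int) + 2 * (c.toNat : Int) * (pvClassify (c.toNat : Int)).1) 95 = _
          rw [pvMod95, hbvn]
          push_cast
          omega
        · show (pvW (done ++ [(c.toNat : Int)].map (fun o => Char.ofNat o.toNat))) % 95 = _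
          simp only [List.map_cons, List.map_nil, hofc]
          rw [pvW_append, hbv, hbvn]
          unfold pvOrd
          push_cast
          omega

lemma pvMain : ∀ (rest done : List Char) (m : Nat) (tN : Nat),
    (∀ c ∈ rest, c.toNat ≤ 126) → tN < 95 → (pvW done) % 95 = (tN : Int) →
    10 * rest.length < m →
    pvGoA m done rest = done ++ pvRunB rest (tN : Int) := by
  intro rest
  induction rest with
  | nil =>
    intro done m tN _ _ _ hm
    obtain ⟨m', rfl⟩ : ∃ m', m = m' + 1 := ⟨m - 1, by omega⟩
    rw [pvGoA, pvRunB]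
    simp
  | cons c rs ih =>
    intro done m tN hchars ht95 hW hm
    have h126 : c.toNat ≤ 126 := hchars c (by simp)
    have hcom : pvNatCompletes 10 tN c.toNat = true := by
      by_cases hcn : pvIsConsN c.toNat = true
      · exact pvG tN c.toNat ht95 (by have := (pvBR' c h126).2.2.2.1 hcn; omega) h126
      · simp [pvNatCompletes, hcn]
    have hm' : (10 : Nat) ≤ m := by simp [List.length_cons] at hm; omega
    obtain ⟨j, hj1, hj10, hgo, tN', h95', hch2, hWf⟩ := pvCL 10 c done rs m tN h126 hW hcom hm'
    rw [hgo, ih _ (m - j) tN' (fun c' hc' => hchars c' (by simp [hc'])) h95' hWf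
      (by simp [List.length_cons] at hm; omega)]
    rw [pvRunB, hch2]
    simp [List.append_assoc]

lemma pvFoldl_runB (l : List Char) (out : List Int) (t : Int) :
    ((l.foldl (fun st ch => pvEmit 10 (ch.toNat : Int) st.2 st.1) (out, t)).1).map (fun o => Char.ofNat o.toNat)
      = out.map (fun o => Char.ofNat o.toNat) ++ pvRunB l t := by
  induction l generalizing out t with
  | nil => simp [pvRunB]
  | cons c rs ih =>
    rw [List.foldl_cons]
    show ((List.foldl _ (pvEmit 10 (c.toNat : Int) t out) rs).1).map _ = _
    rw [pvEmit_acc 10 _ t out, pvRunB, ih]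
    simp

-- ===== VERDICT (by name: the statement is the Claim_ definition above) =====
theorem ascii_transforme_spec : Claim_equal_ascii_transforme := by
  intro mot hdom
  unfold Spec_ascii_transforme ascii_transforme ascii_transforme_alt
  have hchars : ∀ c ∈ mot.toList, c.toNat ≤ 126 := by
    intro c hc
    have hd := List.all_eq_true.mp hdom c hc
    revert hd
    unfold pvDomChar
    simp only [Bool.or_eq_true, Bool.and_eq_true, decide_eq_true_eq, beq_iff_eq]
    omega
  rw [pvFoldl_runB, pvMain mot.toList [] (10 * mot.toList.length + 1) 0 hchars (by omega) (by simp [pvW]) (by omega)]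
  norm_num
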